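-- pv_equiv track=rewrite | github.com/A0308/Protein-app | app.py | generate_sequence_html
-- ===== SOURCE A (Python) =====
-- def generate_sequence_html(sequence):
--     html_sequence = "<div class='sequence'>"
--     for i, char in enumerate(sequence):
--          if i > 0 and i % 50 == 0:
--             html_sequence += "<br>"
--          html_sequence += f"<span class='residue' title='Position: {i }'>{char}</span>"
--     html_sequence += "</div>"
--     return html_sequence
-- ===== SOURCE B (Python) =====
-- def _chunks_of_50(items):
--     return [items[k:k + 50] for k in range(0, len(items), 50)]
--
-- def generate_sequence_html(sequence):
--     spans = [f"<span class='residue' title='Position: {i}'>{char}</span>"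
--              for i, char in enumerate(sequence)]
--     groups = _chunks_of_50(spans)
--     return "<div class='sequence'>" + "<br>".join("".join(g) for g in groups) + "</div>"
-- ===== Notes on version B (the rewrite author's own statement) =====
-- stated objective: alternative
-- what changed: Replaces the single interleaved loop with its index-modulo test by a two-pass pipeline: build all residue spans via enumerate, partition them into groups of 50 by a range-step comprehension, concatenate each group and join the groups with the line-break tag.
import Mathlib
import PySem

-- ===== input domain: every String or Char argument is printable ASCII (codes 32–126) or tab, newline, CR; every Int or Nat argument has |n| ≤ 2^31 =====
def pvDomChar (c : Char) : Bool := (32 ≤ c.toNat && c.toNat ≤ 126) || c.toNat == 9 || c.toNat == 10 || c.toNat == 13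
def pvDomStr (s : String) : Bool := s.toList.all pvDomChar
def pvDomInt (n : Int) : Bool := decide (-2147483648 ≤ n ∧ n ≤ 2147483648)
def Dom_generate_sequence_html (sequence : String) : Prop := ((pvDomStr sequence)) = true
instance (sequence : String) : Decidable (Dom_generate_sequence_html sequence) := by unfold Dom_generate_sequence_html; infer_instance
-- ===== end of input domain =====

-- B builds the list of residue spans, partitions it into groups of 50 and joins the groups
-- with the line-break tag, instead of A's single loop with an index-modulo test: an
-- alternative decomposition of the same O(n) task.


-- ===== PORT A =====
-- Python string concatenation is ported exactly as List Char concatenation; the final value is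
-- wrapped back into String with String.ofList.
def pvBr : List Char := "<br>".toList

-- the f-string "<span class='residue' title='Position: {i}'>{char}</span>"
def pvSpanA (i : Int) (c : Char) : List Char :=
  "<span class='residue' title='Position: ".toList ++ PySem.Int.toChars i
    ++ "'>".toList ++ [c] ++ "</span>".toList

def generate_sequence_html (sequence : String) : String :=
  let body := (PySem.List.enumerate sequence.toList 0).foldl
    (fun acc p =>
      (if 0 < p.1 ∧ PySem.Int.mod p.1 50 = 0 then acc ++ pvBr else acc) ++ pvSpanA p.1 p.2)
    "<div class='sequence'>".toList
  String.ofList (body ++ "</div>".toList)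

-- ===== PORT B =====
def pvSpanB (i : Int) (c : Char) : List Char :=
  "<span class='residue' title='Position: ".toList ++ PySem.Int.toChars i
    ++ "'>".toList ++ [c] ++ "</span>".toList

-- _chunks_of_50: [items[k:k+50] for k in range(0, len(items), 50)]
def pvChunksOf50 {α : Type} (items : List α) : List (List α) :=
  (PySem.List.pyRange 0 (PySem.List.len items) 50).map
    (fun k => PySem.List.slice items (some k) (some (k + 50)))

def generate_sequence_html_alt (sequence : String) : String :=
  let spans := (PySem.List.enumerate sequence.toList 0).map (fun p => pvSpanB p.1 p.2)
  let groups := pvChunksOf50 spans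
  String.ofList ("<div class='sequence'>".toList
    ++ PySem.Chars.join "<br>".toList (groups.map (fun g => PySem.Chars.join [] g))
    ++ "</div>".toList)

-- ===== PRECONDITION & SPEC =====
def Spec_generate_sequence_html (sequence : String) (out : String) : Prop := out = generate_sequence_html_alt sequence
instance (sequence : String) (out : String) : Decidable (Spec_generate_sequence_html sequence out) := by unfold Spec_generate_sequence_html; infer_instance

-- ===== CLAIM (what is proved, stated in full; the proofs are below) =====
def Claim_equal_generate_sequence_html : Prop := ∀ (sequence : String), Dom_generate_sequence_html sequence → Spec_generate_sequence_html sequence (generate_sequence_html sequence)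

-- ===== LEMMAS AND PROOFS =====

-- proof-side recursive view of the chunking
def pvChunks50 {α : Type} (l : List α) : List (List α) :=
  if h : l = [] then []
  else l.take 50 :: pvChunks50 (l.drop 50)
termination_by l.length
decreasing_by
  simp only [List.length_drop]
  have : l.length ≠ 0 := fun h0 => h (List.eq_nil_of_length_eq_zero h0)
  omega

-- A's loop step, as the per-element contribution
def pvH (p : Int × Char) : List Char :=
  (if 0 < p.1 ∧ PySem.Int.mod p.1 50 = 0 then pvBr else []) ++ pvSpanA p.1 p.2

lemma pvSpanB_eq_A (i : Int) (c : Char) : pvSpanB i c = pvSpanA i c := rfl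

lemma join_nil_eq_flatten (gs : List (List Char)) :
    PySem.Chars.join [] gs = gs.flatten := by
  induction gs with
  | nil => simp [PySem.Chars.join_nil]
  | cons g gs ih =>
    cases gs with
    | nil => simp [PySem.Chars.join_singleton]
    | cons g' gs' => simp [PySem.Chars.join_cons_cons, ih]

lemma join_br_cons (g : List Char) (gs : List (List Char)) :
    PySem.Chars.join pvBr (g :: gs) = g ++ gs.flatMap (fun x => pvBr ++ x) := by
  induction gs generalizing g with
  | nil => simp [PySem.Chars.join_singleton]
  | cons g' gs' ih => simp [PySem.Chars.join_cons_cons, ih g']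

lemma pvChunks50_nil {α : Type} : pvChunks50 ([] : List α) = [] := by
  rw [pvChunks50.eq_def]; simp

lemma pvChunks50_cons {α : Type} (l : List α) (h : l ≠ []) :
    pvChunks50 l = l.take 50 :: pvChunks50 (l.drop 50) := by
  rw [pvChunks50.eq_def, dif_neg h]

lemma slice_chunk_shift {α : Type} (l : List α) (k : Nat) :
    PySem.List.slice l (some ((50 : Int) * (k + 1))) (some ((50 : Int) * (k + 1) + 50))
      = PySem.List.slice (l.drop 50) (some ((50 : Int) * k)) (some ((50 : Int) * k + 50)) := by
  have h1 : ((50 : Int) * (k + 1)) = ((50 * (k + 1) : Nat) : Int) := by push_cast; ring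
  have h2 : ((50 : Int) * (k + 1) + 50) = ((50 * (k + 1) + 50 : Nat) : Int) := by push_cast; ring
  have h3 : ((50 : Int) * k) = ((50 * k : Nat) : Int) := by push_cast; ring
  have h4 : ((50 : Int) * k + 50) = ((50 * k + 50 : Nat) : Int) := by push_cast; ring
  rw [h2, h1, h4, h3, PySem.List.slice_natCast, PySem.List.slice_natCast, List.drop_drop]
  have e1 : 50 * (k + 1) + 50 - 50 * (k + 1) = 50 * k + 50 - 50 * k := by omega
  have e2 : 50 * k + 50 = 50 * (k + 1) := by ring
  have e3 : 50 + 50 * k = 50 * (k + 1) := by ring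
  rw [e1, e2, e3]

lemma rangeChunks : ∀ (len : Nat) {α : Type} (l : List α), l.length = len →
    (List.range ((l.length + 49) / 50)).map
        (fun (k : Nat) => PySem.List.slice l (some ((50 : Int) * k)) (some ((50 : Int) * k + 50)))
      = pvChunks50 l := by
  intro len
  induction len using Nat.strong_induction_on with
  | _ len ih =>
    intro α l hlen
    by_cases hl : l = []
    · subst hl
      simp [pvChunks50_nil]
    · have hn : 0 < l.length := List.length_pos_iff.2 hl
      have hm : (l.length + 49) / 50 = ((l.length - 1) / 50) + 1 := by omega
      rw [hm, List.range_succ_eq_map, List.map_cons, List.map_map]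
      have hhead : PySem.List.slice l (some ((50 : Int) * (0 : Nat)))
          (some ((50 : Int) * (0 : Nat) + 50)) = l.take 50 := by
        norm_num
        rw [PySem.List.slice_to (l) (by norm_num : (0 : Int) ≤ 50)]
        congr 1
      have htail : (List.range ((l.length - 1) / 50)).map
            ((fun (k : Nat) => PySem.List.slice l (some ((50 : Int) * k)) (some ((50 : Int) * k + 50)))
              ∘ Nat.succ)
          = (List.range ((l.length - 1) / 50)).map
            (fun (k : Nat) => PySem.List.slice (l.drop 50) (some ((50 : Int) * k))
              (some ((50 : Int) * k + 50))) := by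
        apply List.map_congr_left
        intro k _
        simp only [Function.comp_apply, Nat.succ_eq_add_one]
        have : ((k + 1 : Nat) : Int) = ((k : Nat) : Int) + 1 := by push_cast; ring
        rw [this, slice_chunk_shift]
      have hrec := ih (l.drop 50).length (by simp; omega) (l.drop 50) rfl
      have hcount : ((l.drop 50).length + 49) / 50 = (l.length - 1) / 50 := by
        simp only [List.length_drop]; omega
      rw [hcount] at hrec
      rw [hhead, htail, hrec, pvChunks50_cons l hl]

lemma foldl_eq_flatMap (l : List (Int × Char)) (acc : List Char) :
    l.foldl (fun acc p =>
        (if 0 < p.1 ∧ PySem.Int.mod p.1 50 = 0 then acc ++ pvBr else acc) ++ pvSpanA p.1 p.2) acc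
      = acc ++ l.flatMap pvH := by
  have : (fun (acc : List Char) (p : Int × Char) =>
      (if 0 < p.1 ∧ PySem.Int.mod p.1 50 = 0 then acc ++ pvBr else acc) ++ pvSpanA p.1 p.2)
      = fun acc p => acc ++ pvH p := by
    funext acc p
    simp only [pvH]
    split_ifs <;> simp
  rw [this, PySem.List.foldl_append_eq_flatMap]

lemma flatMap_noTrig (l : List (Int × Char))
    (h : ∀ p ∈ l, ¬ (0 < p.1 ∧ PySem.Int.mod p.1 50 = 0)) :
    l.flatMap pvH = (l.map (fun p => pvSpanA p.1 p.2)).flatten := by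
  induction l with
  | nil => simp
  | cons p l ih =>
    simp only [List.flatMap_cons, List.map_cons, List.flatten_cons]
    rw [ih (fun q hq => h q (List.mem_cons_of_mem _ hq))]
    simp only [pvH, if_neg (h p (List.mem_cons_self ..)), List.nil_append]

-- indices n+0 .. n+len-1 with 50 ∤ each positive one don't trigger
lemma noTrig_of_range (cs : List Char) (n : Int) (h50 : (50 : Int) ∣ n)
    (hlen : cs.length ≤ 50) :
    ∀ p ∈ PySem.List.enumerate cs n, p.1 ≠ n → ¬ (0 < p.1 ∧ PySem.Int.mod p.1 50 = 0) := by
  intro p hp hne hc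
  obtain ⟨k, hk, rfl⟩ := (PySem.List.mem_enumerate_iff _ _ _).1 hp
  have hdvd : (50 : Int) ∣ n + k := (PySem.Int.mod_eq_zero_iff_dvd _ _).1 hc.2
  have hkpos : (0 : Int) < k := by
    rcases Nat.eq_zero_or_pos k with h0 | h0
    · exact absurd (by simp [h0]) hne
    · exact_mod_cast h0
  have hklt : (k : Int) < 50 := by exact_mod_cast lt_of_lt_of_le hk hlen
  omega

-- the tail: every group after the first is emitted as '<br>' ++ its spans
lemma tailLemma : ∀ (len : Nat) (cs : List Char), cs.length = len → ∀ (n : Int),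
    0 < n → (50 : Int) ∣ n →
    (PySem.List.enumerate cs n).flatMap pvH
      = (pvChunks50 ((PySem.List.enumerate cs n).map (fun p => pvSpanA p.1 p.2))).flatMap
          (fun g => pvBr ++ g.flatten) := by
  intro len
  induction len using Nat.strong_induction_on with
  | _ len ih =>
    intro cs hlen n hn h50
    cases cs with
    | nil => simp [PySem.List.enumerate_nil, pvChunks50_nil]
    | cons c rest =>
      have hsplit : rest = rest.take 49 ++ rest.drop 49 := (List.take_append_drop 49 rest).symm
      have henum : PySem.List.enumerate (c :: rest) n
          = (n, c) :: (PySem.List.enumerate (rest.take 49) (n + 1)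
              ++ PySem.List.enumerate (rest.drop 49) (n + 1 + (rest.take 49).length)) := by
        rw [PySem.List.enumerate_cons]
        congr 1
        conv_lhs => rw [hsplit]
        exact PySem.List.enumerate_append ..
      have htrig : pvH (n, c) = pvBr ++ pvSpanA n c := by
        simp only [pvH]
        rw [if_pos ⟨hn, (PySem.Int.mod_eq_zero_iff_dvd n 50).2 h50⟩]
      by_cases hbig : rest.drop 49 = []
      · -- at most 50 residues left: a single final group
        have hle : rest.length ≤ 49 := by
          have := congrArg List.length hsplit
          simp [hbig] at this; omega
        have hnotrig := noTrig_of_range (c :: rest) n h50 (by simp; omega)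
        have hflat : (PySem.List.enumerate rest (n + 1)).flatMap pvH
            = ((PySem.List.enumerate rest (n + 1)).map (fun p => pvSpanA p.1 p.2)).flatten := by
          apply flatMap_noTrig
          intro p hp
          have hpmem : p ∈ PySem.List.enumerate (c :: rest) n := by
            rw [PySem.List.enumerate_cons]; exact List.mem_cons_of_mem _ hp
          obtain ⟨k, hk, rfl⟩ := (PySem.List.mem_enumerate_iff _ _ _).1 hp
          exact hnotrig _ hpmem (by omega)
        have hchunk : pvChunks50 ((PySem.List.enumerate (c :: rest) n).map
              (fun p => pvSpanA p.1 p.2))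
            = [(PySem.List.enumerate (c :: rest) n).map (fun p => pvSpanA p.1 p.2)] := by
          rw [pvChunks50_cons _ (by simp [PySem.List.enumerate_cons])]
          have hlen' : ((PySem.List.enumerate (c :: rest) n).map
              (fun p => pvSpanA p.1 p.2)).length ≤ 50 := by
            simp [PySem.List.length_enumerate]; omega
          rw [List.take_of_length_le hlen', List.drop_of_length_le hlen', pvChunks50_nil]
        rw [hchunk]
        simp only [List.flatMap_cons, List.flatMap_nil, List.append_nil,
          PySem.List.enumerate_cons, List.map_cons, List.flatten_cons]
        rw [hflat, htrig]
        simp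
      · -- a full group of 50, then recurse
        have h49 : (rest.take 49).length = 49 := by
          rw [List.length_take]
          have : rest.length > 49 := by
            by_contra hcon
            exact hbig (List.drop_of_length_le (by omega))
          omega
        have hflatTake : (PySem.List.enumerate (rest.take 49) (n + 1)).flatMap pvH
            = ((PySem.List.enumerate (rest.take 49) (n + 1)).map
                (fun p => pvSpanA p.1 p.2)).flatten := by
          apply flatMap_noTrig
          intro p hp
          obtain ⟨k, hk, rfl⟩ := (PySem.List.mem_enumerate_iff _ _ _).1 hp
          intro hc
          have hdvd : (50 : Int) ∣ n + 1 + k := (PySem.Int.mod_eq_zero_iff_dvd _ _).1 hc.2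
          have : (k : Int) < 49 := by exact_mod_cast lt_of_lt_of_le hk (le_of_eq h49)
          have : (0 : Int) ≤ k := by exact_mod_cast Nat.zero_le k
          omega
        have hrec := ih (rest.drop 49).length (by simp at hlen ⊢; omega)
            (rest.drop 49) rfl (n + 50) (by omega) (by omega)
        have hstep : n + 1 + (49 : Nat) = n + 50 := by omega
        have hchunkside : pvChunks50 ((PySem.List.enumerate (c :: rest) n).map
              (fun p => pvSpanA p.1 p.2))
            = ((pvSpanA n c :: (PySem.List.enumerate (rest.take 49) (n + 1)).map
                  (fun p => pvSpanA p.1 p.2))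
               :: pvChunks50 ((PySem.List.enumerate (rest.drop 49) (n + 50)).map
                  (fun p => pvSpanA p.1 p.2))) := by
          rw [pvChunks50_cons _ (by simp [PySem.List.enumerate_cons])]
          have hmap : (PySem.List.enumerate (c :: rest) n).map (fun p => pvSpanA p.1 p.2)
              = (pvSpanA n c :: (PySem.List.enumerate (rest.take 49) (n + 1)).map
                    (fun p => pvSpanA p.1 p.2))
                ++ (PySem.List.enumerate (rest.drop 49) (n + 50)).map
                    (fun p => pvSpanA p.1 p.2) := by
            rw [henum, h49, hstep]; simp
          rw [hmap]
          have hfirstlen : (pvSpanA n c :: (PySem.List.enumerate (rest.take 49) (n + 1)).map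
              (fun p => pvSpanA p.1 p.2)).length = 50 := by
            simp [PySem.List.length_enumerate, h49]
          rw [List.take_append_of_le_length (by omega), List.drop_append_of_le_length (by omega)]
          rw [List.take_of_length_le (by omega), List.drop_of_length_le (by omega)]
          simp
        rw [hchunkside, henum]
        simp only [List.flatMap_cons, List.flatMap_append]
        rw [hflatTake, h49, hstep, hrec, htrig]
        simp [List.append_assoc]

-- the whole body: A's interleaved fold equals B's chunk-and-join
lemma bodyLemma (cs : List Char) :
    (PySem.List.enumerate cs 0).flatMap pvH
      = PySem.Chars.join "<br>".toList
          ((pvChunks50 ((PySem.List.enumerate cs 0).map (fun p => pvSpanA p.1 p.2))).map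
            (fun g => PySem.Chars.join [] g)) := by
  have hbr : "<br>".toList = pvBr := rfl
  rw [hbr]
  cases hcs : cs with
  | nil => simp [PySem.List.enumerate_nil, pvChunks50_nil, PySem.Chars.join_nil]
  | cons c rest =>
    have hsplit : rest = rest.take 49 ++ rest.drop 49 := (List.take_append_drop 49 rest).symm
    have henum : PySem.List.enumerate (c :: rest) 0
        = (0, c) :: (PySem.List.enumerate (rest.take 49) 1
            ++ PySem.List.enumerate (rest.drop 49) (1 + (rest.take 49).length)) := by
      rw [PySem.List.enumerate_cons]
      congr 1
      conv_lhs => rw [hsplit]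
      have := PySem.List.enumerate_append (rest.take 49) (rest.drop 49) 1
      simpa using this
    have hnotrig0 : pvH (0, c) = pvSpanA 0 c := by
      simp only [pvH]
      rw [if_neg (by simp)]
      simp
    by_cases hbig : rest.drop 49 = []
    · have hle : rest.length ≤ 49 := by
        have := congrArg List.length hsplit
        simp [hbig] at this; omega
      have hflat : (PySem.List.enumerate rest 1).flatMap pvH
          = ((PySem.List.enumerate rest 1).map (fun p => pvSpanA p.1 p.2)).flatten := by
        apply flatMap_noTrig
        intro p hp hc
        obtain ⟨k, hk, rfl⟩ := (PySem.List.mem_enumerate_iff _ _ _).1 hp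
        have hdvd : (50 : Int) ∣ 1 + k := (PySem.Int.mod_eq_zero_iff_dvd _ _).1 hc.2
        have h1 : (k : Int) < 49 := by exact_mod_cast lt_of_lt_of_le hk hle
        have h2 : (0 : Int) ≤ k := by exact_mod_cast Nat.zero_le k
        omega
      have hchunk : pvChunks50 ((PySem.List.enumerate (c :: rest) 0).map
            (fun p => pvSpanA p.1 p.2))
          = [(PySem.List.enumerate (c :: rest) 0).map (fun p => pvSpanA p.1 p.2)] := by
        rw [pvChunks50_cons _ (by simp [PySem.List.enumerate_cons])]
        have hlen' : ((PySem.List.enumerate (c :: rest) 0).map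
            (fun p => pvSpanA p.1 p.2)).length ≤ 50 := by
          simp [PySem.List.length_enumerate]; omega
        rw [List.take_of_length_le hlen', List.drop_of_length_le hlen', pvChunks50_nil]
      rw [hchunk]
      simp only [List.map_cons, List.map_nil, PySem.Chars.join_singleton, join_nil_eq_flatten,
        PySem.List.enumerate_cons, List.flatMap_cons, List.map_cons, List.flatten_cons, zero_add]
      rw [hflat, hnotrig0]
    · have h49 : (rest.take 49).length = 49 := by
        rw [List.length_take]
        have : rest.length > 49 := by
          by_contra hcon
          exact hbig (List.drop_of_length_le (by omega))
        omega
      have hflatTake : (PySem.List.enumerate (rest.take 49) 1).flatMap pvH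
          = ((PySem.List.enumerate (rest.take 49) 1).map
              (fun p => pvSpanA p.1 p.2)).flatten := by
        apply flatMap_noTrig
        intro p hp hc
        obtain ⟨k, hk, rfl⟩ := (PySem.List.mem_enumerate_iff _ _ _).1 hp
        have hdvd : (50 : Int) ∣ 1 + k := (PySem.Int.mod_eq_zero_iff_dvd _ _).1 hc.2
        have h1 : (k : Int) < 49 := by exact_mod_cast lt_of_lt_of_le hk (le_of_eq h49)
        have h2 : (0 : Int) ≤ k := by exact_mod_cast Nat.zero_le k
        omega
      have hstep : (1 : Int) + (49 : Nat) = 50 := by omega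
      have hrec := tailLemma (rest.drop 49).length (rest.drop 49) rfl 50 (by norm_num) (by norm_num)
      have hchunkside : pvChunks50 ((PySem.List.enumerate (c :: rest) 0).map
            (fun p => pvSpanA p.1 p.2))
          = ((pvSpanA 0 c :: (PySem.List.enumerate (rest.take 49) 1).map
                (fun p => pvSpanA p.1 p.2))
             :: pvChunks50 ((PySem.List.enumerate (rest.drop 49) 50).map
                (fun p => pvSpanA p.1 p.2))) := by
        rw [pvChunks50_cons _ (by simp [PySem.List.enumerate_cons])]
        have hmap : (PySem.List.enumerate (c :: rest) 0).map (fun p => pvSpanA p.1 p.2)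
            = (pvSpanA 0 c :: (PySem.List.enumerate (rest.take 49) 1).map
                  (fun p => pvSpanA p.1 p.2))
              ++ (PySem.List.enumerate (rest.drop 49) 50).map
                  (fun p => pvSpanA p.1 p.2) := by
          rw [henum, h49, hstep]; simp
        rw [hmap]
        have hfirstlen : (pvSpanA 0 c :: (PySem.List.enumerate (rest.take 49) 1).map
            (fun p => pvSpanA p.1 p.2)).length = 50 := by
          simp [PySem.List.length_enumerate, h49]
        rw [List.take_append_of_le_length (by omega), List.drop_append_of_le_length (by omega)]
        rw [List.take_of_length_le (by omega), List.drop_of_length_le (by omega)]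
        simp
      rw [hchunkside, henum]
      simp only [List.flatMap_cons, List.flatMap_append]
      rw [hflatTake, h49, hstep, hrec, hnotrig0]
      rw [List.map_cons, join_br_cons]
      simp only [join_nil_eq_flatten, List.flatMap_map, List.flatten_cons]
      simp [List.append_assoc]

-- B's comprehension over range(0, len, 50) computes the recursive chunking
lemma groups_eq {α : Type} (l : List α) : pvChunksOf50 l = pvChunks50 l := by
  unfold pvChunksOf50
  rw [PySem.List.len_eq, PySem.List.pyRange_of_pos 0 (l.length : Int) (by norm_num)]
  have hcnt : (if (0 : Int) < (l.length : Int)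
      then (((l.length : Int) - 0 + 50 - 1) / 50).toNat else 0) = (l.length + 49) / 50 := by
    split_ifs with h0 <;> omega
  rw [hcnt, List.map_map]
  have hfun : ((fun k => PySem.List.slice l (some k) (some (k + 50)))
        ∘ (fun k : Nat => (0 : Int) + 50 * k))
      = fun (k : Nat) => PySem.List.slice l (some ((50 : Int) * k))
          (some ((50 : Int) * k + 50)) := by
    funext k; simp
  rw [hfun, rangeChunks l.length l rfl]

-- ===== VERDICT (by name: the statement is the Claim_ definition above) =====
theorem generate_sequence_html_spec : Claim_equal_generate_sequence_html := by
  intro sequence _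
  unfold Spec_generate_sequence_html generate_sequence_html generate_sequence_html_alt
  simp only [pvSpanB_eq_A, groups_eq]
  rw [foldl_eq_flatMap, bodyLemma]
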